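-- pv_equiv track=rewrite | github.com/TuanOnta/Tucil1_13522149 | src/command.py | hitungPoint
-- ===== SOURCE A (Python) =====
-- def is_subarray(subarray, array):
--     len_array = len(array)
--     len_subarray = len(subarray)
--
--     if len_subarray > len_array:
--         return False
--
--     for i in range(len_array - len_subarray + 1):
--         if array[i:i + len_subarray] == subarray:
--             return True
--
--     return False
--
-- def hitungPoint(number_of_sequence,array_of_sequence,array_of_value,buffer_solutions):
--     best_seq = buffer_solutions[0]
--     best_val = 0
--     for sol in  buffer_solutions:
--         val = 0
--         for i in range (number_of_sequence):
--             if is_subarray(array_of_sequence[i],sol):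
--                 val += array_of_value[i]
--         if(val > best_val):
--             best_seq = sol
--             best_val = val
--     return best_seq, best_val
-- ===== SOURCE B (Python) =====
-- def _occurs(sub, arr):
--     # does sub occur as a contiguous subarray of arr? (peel the front until a prefix match)
--     m = len(sub)
--     while True:
--         if arr[:m] == sub:
--             return True
--         if not arr:
--             return False
--         arr = arr[1:]
--
-- def hitungPoint(number_of_sequence, array_of_sequence, array_of_value, buffer_solutions):
--     n = max(0, number_of_sequence)
--     pairs = list(zip(array_of_sequence[:n], array_of_value[:n]))
--     scores = [sum(v for p, v in pairs if _occurs(p, sol)) for sol in buffer_solutions]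
--     best = max(scores)
--     if best > 0:
--         return buffer_solutions[scores.index(best)], best
--     return buffer_solutions[0], 0
-- ===== Notes on version B (the rewrite author's own statement) =====
-- stated objective: alternative
-- what changed: is_subarray's slice-per-window index loop becomes a front-peeling prefix scan, and the running best_seq/best_val accumulator loop is replaced by computing the score list once and selecting via max()/index() with the same strict->0 threshold.
-- outside the precondition, e.g. on hitungPoint(2, [[1], [2]], [5], [[1]]): A returns ([1], 5), B returns ([1], 5)
import Mathlib
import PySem

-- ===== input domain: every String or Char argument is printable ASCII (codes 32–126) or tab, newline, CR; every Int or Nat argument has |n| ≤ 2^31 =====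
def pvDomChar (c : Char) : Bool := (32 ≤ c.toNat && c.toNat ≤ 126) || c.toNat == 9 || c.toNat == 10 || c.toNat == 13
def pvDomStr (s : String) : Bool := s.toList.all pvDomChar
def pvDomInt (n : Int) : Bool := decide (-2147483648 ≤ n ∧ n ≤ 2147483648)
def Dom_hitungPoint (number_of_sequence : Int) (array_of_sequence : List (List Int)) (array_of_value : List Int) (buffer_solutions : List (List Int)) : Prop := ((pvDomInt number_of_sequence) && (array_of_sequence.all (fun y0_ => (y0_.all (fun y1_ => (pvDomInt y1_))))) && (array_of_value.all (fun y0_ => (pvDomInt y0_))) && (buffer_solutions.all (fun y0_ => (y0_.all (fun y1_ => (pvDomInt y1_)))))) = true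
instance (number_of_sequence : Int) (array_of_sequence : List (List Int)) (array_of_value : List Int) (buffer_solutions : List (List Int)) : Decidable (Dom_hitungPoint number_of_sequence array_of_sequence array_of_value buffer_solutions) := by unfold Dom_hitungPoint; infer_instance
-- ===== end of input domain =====

-- B replaces the slice-per-window membership test by a front-peeling prefix scan and the running-best loop
-- by a score list with a single max/index selection (objective: alternative decomposition, same exact results).


-- ===== PORT A =====
-- is_subarray: for each window start i, compare the slice sol[i:i+len(sub)] with sub (early return ported as or-fold)
def isSubarray (subarray array : List Int) : Bool :=
  let len_array : Int := array.length
  let len_subarray : Int := subarray.length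
  if len_subarray > len_array then false
  else
    (PySem.List.pyRange 0 (len_array - len_subarray + 1) 1).foldl
      (fun found i =>
        found || (PySem.List.slice array (some i) (some (i + len_subarray)) == subarray))
      false

def hitungPoint (number_of_sequence : Int) (array_of_sequence : List (List Int)) (array_of_value : List Int) (buffer_solutions : List (List Int)) : List Int × Int :=
  let best_seq : List Int := PySem.List.pyGetD buffer_solutions 0 []   -- buffer_solutions[0]; in range by Pre_
  buffer_solutions.foldl
    (fun (best : List Int × Int) sol =>
      let val : Int :=
        (PySem.List.pyRange 0 number_of_sequence 1).foldl
          (fun v i =>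
            if isSubarray (PySem.List.pyGetD array_of_sequence i []) sol
            then v + PySem.List.pyGetD array_of_value i 0
            else v)
          0
      if val > best.2 then (sol, val) else best)
    (best_seq, 0)

-- ===== PORT B =====
-- _occurs: peel the front of arr, testing arr[:len(sub)] == sub at each step (arr[:m] with m = len sub ≥ 0 is take)
def occurs (sub : List Int) : List Int → Bool
  | [] => (([] : List Int).take sub.length == sub)
  | a :: t => ((a :: t).take sub.length == sub) || occurs sub t

-- score of one solution: sum of v over the zipped (pattern, value) pairs whose pattern occurs
def scoreB (pairs : List (List Int × Int)) (sol : List Int) : Int :=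
  pairs.foldl (fun acc pv => if occurs pv.1 sol then acc + pv.2 else acc) 0

def hitungPoint_alt (number_of_sequence : Int) (array_of_sequence : List (List Int)) (array_of_value : List Int) (buffer_solutions : List (List Int)) : List Int × Int :=
  let n : Nat := (max 0 number_of_sequence).toNat
  let pairs := (array_of_sequence.take n).zip (array_of_value.take n)
  let scores := buffer_solutions.map (scoreB pairs)
  match PySem.List.max? scores (fun y => y) with   -- max(scores); none = Python ValueError, excluded by Pre_
  | none => ([], 0)
  | some best =>
    if best > 0 then
      (buffer_solutions.getD ((PySem.List.index? scores best).getD 0) [], best)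
    else (buffer_solutions.getD 0 [], 0)

-- ===== PRECONDITION & SPEC =====
-- Pre_ excludes where A can raise: empty buffer_solutions (IndexError on buffer_solutions[0] / ValueError in B's
-- max) and number_of_sequence exceeding the length of array_of_sequence or array_of_value; when only
-- array_of_value is too short A raises IndexError exactly when some pattern past its end matches a solution
-- (a data-dependent condition), so that bound is excluded uniformly (A and B agree where A still returns).
def Pre_hitungPoint (number_of_sequence : Int) (array_of_sequence : List (List Int)) (array_of_value : List Int) (buffer_solutions : List (List Int)) : Prop :=
  buffer_solutions ≠ [] ∧ number_of_sequence ≤ (array_of_sequence.length : Int) ∧ number_of_sequence ≤ (array_of_value.length : Int)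
instance (number_of_sequence : Int) (array_of_sequence : List (List Int)) (array_of_value : List Int) (buffer_solutions : List (List Int)) : Decidable (Pre_hitungPoint number_of_sequence array_of_sequence array_of_value buffer_solutions) := by unfold Pre_hitungPoint; infer_instance

def pvWitness_hitungPoint : Int × List (List Int) × List Int × List (List Int) :=
  (2, [[1, 2], [3]], [5, 7], [[0, 1, 2], [3, 4]])

def Spec_hitungPoint (number_of_sequence : Int) (array_of_sequence : List (List Int)) (array_of_value : List Int) (buffer_solutions : List (List Int)) (out : List Int × Int) : Prop := out = hitungPoint_alt number_of_sequence array_of_sequence array_of_value buffer_solutions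
instance (number_of_sequence : Int) (array_of_sequence : List (List Int)) (array_of_value : List Int) (buffer_solutions : List (List Int)) (out : List Int × Int) : Decidable (Spec_hitungPoint number_of_sequence array_of_sequence array_of_value buffer_solutions out) := by unfold Spec_hitungPoint; infer_instance

-- ===== CLAIM (what is proved, stated in full; the proofs are below) =====
def Claim_equal_hitungPoint : Prop := ∀ (number_of_sequence : Int) (array_of_sequence : List (List Int)) (array_of_value : List Int) (buffer_solutions : List (List Int)), Dom_hitungPoint number_of_sequence array_of_sequence array_of_value buffer_solutions → Pre_hitungPoint number_of_sequence array_of_sequence array_of_value buffer_solutions → Spec_hitungPoint number_of_sequence array_of_sequence array_of_value buffer_solutions (hitungPoint number_of_sequence array_of_sequence array_of_value buffer_solutions)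
-- ===== LEMMAS AND PROOFS =====

-- B's front-peeling scan finds sub exactly when sub is a contiguous infix
lemma occurs_iff (sub arr : List Int) : occurs sub arr = true ↔ sub <:+: arr := by
  induction arr with
  | nil =>
    simp only [occurs, List.take_nil, beq_iff_eq, List.infix_nil]
    exact eq_comm
  | cons a t ih =>
    have hpre : (a :: t).take sub.length = sub ↔ sub <+: a :: t := by
      constructor
      · intro h; exact List.prefix_iff_eq_take.mpr h.symm
      · intro h; exact (List.prefix_iff_eq_take.mp h).symm
    simp only [occurs, Bool.or_eq_true, beq_iff_eq, ih, List.infix_cons_iff, hpre]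

lemma foldl_or (l : List Int) (p : Int → Bool) (b : Bool) :
    l.foldl (fun acc x => acc || p x) b = (b || l.any p) := by
  induction l generalizing b with
  | nil => simp
  | cons x t ih => simp [ih, Bool.or_assoc]

-- A's window loop finds sub exactly when sub is a contiguous infix
lemma isSubarray_iff (sub arr : List Int) : isSubarray sub arr = true ↔ sub <:+: arr := by
  unfold isSubarray
  simp only []
  split_ifs with hlen
  · simp only [false_iff]
    intro h
    have := h.length_le
    omega
  · rw [foldl_or]
    simp only [Bool.false_or, List.any_eq_true, PySem.List.mem_pyRange_one, beq_iff_eq]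
    constructor
    · rintro ⟨i, ⟨h0, hi⟩, hslice⟩
      obtain ⟨j, rfl⟩ : ∃ j : Nat, i = (j : Int) := ⟨i.toNat, by omega⟩
      rw [show ((sub.length : Int)) = ((sub.length : Nat) : Int) from rfl,
        PySem.List.slice_natCast_add] at hslice
      rw [← hslice]
      exact ((List.take_prefix _ _).isInfix).trans (List.drop_suffix j arr).isInfix
    · rintro ⟨pre, suf, hps⟩
      refine ⟨(pre.length : Int), ⟨by positivity, ?_⟩, ?_⟩
      · have : arr.length = pre.length + sub.length + suf.length := by
          rw [← hps]; simp; omega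
        omega
      · rw [show ((sub.length : Int)) = ((sub.length : Nat) : Int) from rfl,
          PySem.List.slice_natCast_add, ← hps, List.append_assoc, List.drop_left, List.take_left]

lemma occurs_eq_isSubarray (sub arr : List Int) : isSubarray sub arr = occurs sub arr := by
  rw [Bool.eq_iff_iff, isSubarray_iff, occurs_iff]

-- A's indexed value loop computes B's score over the zipped prefix pairs
lemma score_eq (seqs : List (List Int)) (vals : List Int) (sol : List Int) (nn : Nat)
    (h1 : nn ≤ seqs.length) (h2 : nn ≤ vals.length) :
    (PySem.List.pyRange 0 (nn : Int) 1).foldl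
      (fun v i => if isSubarray (PySem.List.pyGetD seqs i []) sol
                  then v + PySem.List.pyGetD vals i 0 else v) 0
    = scoreB ((seqs.take nn).zip (vals.take nn)) sol := by
  induction nn with
  | zero => simp [scoreB, PySem.List.pyRange_one_eq_nil]
  | succ k ih =>
    have hk1 : k < seqs.length := by omega
    have hk2 : k < vals.length := by omega
    have hcast : ((k + 1 : Nat) : Int) = (k : Int) + 1 := by push_cast; ring
    rw [hcast, PySem.List.pyRange_one_succ_right (by positivity), List.foldl_append,
      ih (by omega) (by omega)]
    rw [List.take_succ_eq_append_getElem hk1, List.take_succ_eq_append_getElem hk2,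
      List.zip_append (by simp; omega)]
    simp only [List.foldl_cons, List.foldl_nil, scoreB, List.foldl_append,
      List.zip_cons_cons, List.zip_nil_right]
    rw [occurs_eq_isSubarray]
    simp [PySem.List.pyGetD_natCast, hk1, hk2]

-- the running strict-improvement fold equals "first maximum, if above the start value"
lemma sel (f : List Int → Int) (l : List (List Int)) (bs : List Int) (bv : Int) :
    l.foldl (fun best sol => if f sol > best.2 then (sol, f sol) else best) (bs, bv)
    = match PySem.List.max? (l.map f) (fun y => y) with
      | none => (bs, bv)
      | some mx =>
        if mx > bv then (l.getD ((PySem.List.index? (l.map f) mx).getD 0) [], mx) else (bs, bv) := by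
  induction l generalizing bs bv with
  | nil => simp [PySem.List.max?]
  | cons s t ih =>
    rw [List.foldl_cons]
    rcases t with _ | ⟨u, t'⟩
    · simp only [List.foldl_nil, List.map_cons, List.map_nil, PySem.List.max?_id_cons,
        PySem.List.index?_cons_self, Option.getD_some, List.getD_cons_zero]
    · have hmt : PySem.List.max? ((u :: t').map f) (fun y => y) = some ((t'.map f).foldl max (f u)) := by
        simp only [List.map_cons]; exact PySem.List.max?_id_cons _ _
      set m := (t'.map f).foldl max (f u) with hm
      have hM : PySem.List.max? ((s :: u :: t').map f) (fun y => y) = some (max (f s) m) := by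
        simp only [List.map_cons, PySem.List.max?_id_cons, List.foldl_cons, Option.some.injEq]
        rw [hm]; exact List.foldl_assoc (op := (max : Int → Int → Int))
      by_cases hcmp : f s < m
      · have hne : f s ≠ m := ne_of_lt hcmp
        obtain ⟨j, hj⟩ := Option.isSome_iff_exists.mp
          ((PySem.List.index?_isSome_iff _ m).mpr (PySem.List.max?_mem hmt))
        have hidx : PySem.List.index? ((s :: u :: t').map f) m = some (j + 1) := by
          simp only [List.map_cons] at hj ⊢
          rw [PySem.List.index?_cons_of_ne _ hne, hj]; rfl
        have hmax : max (f s) m = m := max_eq_right (le_of_lt hcmp)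
        simp only [hM, hmax, hidx, Option.getD_some, List.getD_cons_succ]
        by_cases hfs : f s > bv
        · have h1 : m > bv := lt_trans hfs hcmp
          simp only [hfs, if_true, ih, hmt, hj, Option.getD_some, hcmp, h1]
        · simp only [hfs, if_false, ih, hmt, hj, Option.getD_some]
      · have hmax : max (f s) m = f s := max_eq_left (not_lt.mp hcmp)
        have hidx : PySem.List.index? ((s :: u :: t').map f) (f s) = some 0 := by
          simp only [List.map_cons]; exact PySem.List.index?_cons_self _ _
        simp only [hM, hmax, hidx, Option.getD_some, List.getD_cons_zero]
        by_cases hfs : f s > bv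
        · simp only [hfs, if_true, ih, hmt]
          have : ¬ (m > (s, f s).2) := by simpa using hcmp
          simp [this]
        · simp only [hfs, if_false, ih, hmt]
          have : ¬ (m > (bs, bv).2) := by simp; omega
          simp [this, hfs]

-- ===== VERDICT (by name: the statement is the Claim_ definition above) =====
theorem hitungPoint_spec : Claim_equal_hitungPoint := by
  intro n seqs vals sols _ hpre
  obtain ⟨hne, h1, h2⟩ := hpre
  unfold Spec_hitungPoint
  set nn : Nat := (max 0 n).toNat with hnn
  have hnn1 : nn ≤ seqs.length := by omega
  have hnn2 : nn ≤ vals.length := by omega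
  have hr : PySem.List.pyRange 0 n 1 = PySem.List.pyRange 0 (nn : Int) 1 := by
    by_cases hn : 0 ≤ n
    · congr 1; omega
    · rw [PySem.List.pyRange_one_eq_nil (by omega), PySem.List.pyRange_one_eq_nil (by omega)]
  have hbody : (fun (best : List Int × Int) sol =>
      let val : Int :=
        (PySem.List.pyRange 0 n 1).foldl
          (fun v i =>
            if isSubarray (PySem.List.pyGetD seqs i []) sol
            then v + PySem.List.pyGetD vals i 0
            else v) 0
      if val > best.2 then (sol, val) else best)
      = (fun (best : List Int × Int) sol =>
          if scoreB ((seqs.take nn).zip (vals.take nn)) sol > best.2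
          then (sol, scoreB ((seqs.take nn).zip (vals.take nn)) sol) else best) := by
    funext best sol
    rw [hr, score_eq seqs vals sol nn hnn1 hnn2]
  rw [hitungPoint, hbody, sel]
  rw [hitungPoint_alt]
  simp only [← hnn]
  rcases sols with _ | ⟨s0, t⟩
  · exact absurd rfl hne
  · simp only [List.map_cons, PySem.List.max?_id_cons, PySem.List.pyGetD_zero, List.getD_cons_zero]
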